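-- pv_equiv track=rewrite | github.com/Muski360/MuskiGuess | backend/app.py | _check_guess_statuses_for_word
-- ===== SOURCE A (Python) =====
-- def _check_guess_statuses_for_word(word: str, guess: str):
--     """Return list of {letter, status} for a single word vs guess, Wordle rules."""
--     letters = [c.upper() for c in guess]
--     statuses = [None] * 5
--     word_chars = list(word)
--     guess_chars = list(guess)
--     word_used = [False] * 5
--     # Greens first
--     for i in range(5):
--         if guess_chars[i] == word_chars[i]:
--             statuses[i] = 'green'
--             word_used[i] = True
--     # Yellows/Grays
--     for i in range(5):
--         if statuses[i] is None:
--             found = False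
--             for j in range(5):
--                 if not word_used[j] and guess_chars[i] == word_chars[j]:
--                     found = True
--                     word_used[j] = True
--                     break
--             statuses[i] = 'yellow' if found else 'gray'
--     return [{"letter": letters[i], "status": statuses[i]} for i in range(5)]
-- ===== SOURCE B (Python) =====
-- def _check_guess_statuses_for_word(word: str, guess: str):
--     """Return list of {letter, status} per Wordle rules: counter-based, no inner scan."""
--     remaining = {}
--     for i in range(5):
--         remaining[word[i]] = remaining.get(word[i], 0) + 1
--     statuses = [None] * 5
--     # Greens first: consume the matched letter from the pool
--     for i in range(5):
--         if guess[i] == word[i]: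
--             statuses[i] = 'green'
--             remaining[word[i]] -= 1
--     # Yellows/Grays from the remaining pool
--     for i in range(5):
--         if statuses[i] is None:
--             if remaining.get(guess[i], 0) > 0:
--                 statuses[i] = 'yellow'
--                 remaining[guess[i]] -= 1
--             else:
--                 statuses[i] = 'gray'
--     return [{"letter": guess[i].upper(), "status": statuses[i]} for i in range(5)]
-- ===== Notes on version B (the rewrite author's own statement) =====
-- stated objective: idiomatic
-- what changed: Replaced A's per-position inner scan over a word_used flag array (with break) by a letter-frequency dictionary: count the word's first five letters once, consume counts for greens, then a single pass decides yellow/gray by a counter lookup; B also uppercases only the five output letters instead of A's whole-guess letters list.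
import Mathlib
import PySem

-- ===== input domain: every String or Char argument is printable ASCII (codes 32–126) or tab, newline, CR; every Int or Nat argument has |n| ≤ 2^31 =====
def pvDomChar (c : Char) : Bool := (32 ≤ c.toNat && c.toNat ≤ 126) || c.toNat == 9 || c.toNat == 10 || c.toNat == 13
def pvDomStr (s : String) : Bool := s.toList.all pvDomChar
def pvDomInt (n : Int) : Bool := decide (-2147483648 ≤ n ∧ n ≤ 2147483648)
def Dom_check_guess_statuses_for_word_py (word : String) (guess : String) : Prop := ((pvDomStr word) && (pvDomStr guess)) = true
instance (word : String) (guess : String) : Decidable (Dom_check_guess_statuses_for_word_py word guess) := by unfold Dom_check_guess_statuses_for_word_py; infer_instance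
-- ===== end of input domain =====

-- B replaces A's inner scan over a word_used flag array by a letter-frequency dictionary (idiomatic Wordle counting); equal on all pairs of strings of length ≥ 5 (A raises IndexError below that).

-- ===== PORT A =====
-- guess[i].upper() for a single character (used by both sources' output comprehension)
def pvUp (c : Char) : String := String.mk [PySem.Chars.upperChar c]

-- the inner 'for j in range(5): … break' scan of A
def pvInnerA (wc : List Char) (g : Char) : List Int → List Bool → Bool × List Bool
  | [], used => (false, used)
  | j :: rest, used =>
    if PySem.List.pyGetD used j true = false ∧ PySem.List.pyGetD wc j ' ' = g then
      (true, PySem.List.pySetD used j true)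
    else pvInnerA wc g rest used

-- body of A's first (greens) loop; state = (statuses, word_used)
def pvStepGreenA (wc gc : List Char) (st : List (Option String) × List Bool) (i : Int) :
    List (Option String) × List Bool :=
  if PySem.List.pyGetD gc i ' ' = PySem.List.pyGetD wc i ' ' then
    (PySem.List.pySetD st.1 i (some "green"), PySem.List.pySetD st.2 i true)
  else st

-- body of A's second (yellow/gray) loop
def pvStepYellowA (wc gc : List Char) (st : List (Option String) × List Bool) (i : Int) :
    List (Option String) × List Bool :=
  if PySem.List.pyGetD st.1 i none = none then
    (PySem.List.pySetD st.1 i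
      (some (if (pvInnerA wc (PySem.List.pyGetD gc i ' ') (PySem.List.pyRange 0 5 1) st.2).1
             then "yellow" else "gray")),
     (pvInnerA wc (PySem.List.pyGetD gc i ' ') (PySem.List.pyRange 0 5 1) st.2).2)
  else st

def check_guess_statuses_for_word_py (word : String) (guess : String) : List (List (String × String)) :=
  let letters := guess.toList.map pvUp
  let wc := word.toList
  let gc := guess.toList
  let s1 := (PySem.List.pyRange 0 5 1).foldl (pvStepGreenA wc gc)
              (List.replicate 5 none, List.replicate 5 false)
  let s2 := (PySem.List.pyRange 0 5 1).foldl (pvStepYellowA wc gc) s1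
  (PySem.List.pyRange 0 5 1).map (fun i =>
    [("letter", PySem.List.pyGetD letters i ""), ("status", (PySem.List.pyGetD s2.1 i none).getD "")])

-- ===== PORT B =====
-- remaining[word[i]] = remaining.get(word[i], 0) + 1
def pvBuildStepB (wc : List Char) (d : PySem.Dict Char Int) (i : Int) : PySem.Dict Char Int :=
  d.insert (PySem.List.pyGetD wc i ' ') (d.getD (PySem.List.pyGetD wc i ' ') 0 + 1)

-- body of B's greens loop; state = (statuses, remaining)
def pvStepGreenB (wc gc : List Char) (st : List (Option String) × PySem.Dict Char Int) (i : Int) :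
    List (Option String) × PySem.Dict Char Int :=
  if PySem.List.pyGetD gc i ' ' = PySem.List.pyGetD wc i ' ' then
    (PySem.List.pySetD st.1 i (some "green"),
     st.2.insert (PySem.List.pyGetD wc i ' ') (st.2.getD (PySem.List.pyGetD wc i ' ') 0 - 1))
  else st

-- body of B's yellow/gray loop: one counter lookup instead of a scan
def pvStepYellowB (wc gc : List Char) (st : List (Option String) × PySem.Dict Char Int) (i : Int) :
    List (Option String) × PySem.Dict Char Int :=
  if PySem.List.pyGetD st.1 i none = none then
    if 0 < st.2.getD (PySem.List.pyGetD gc i ' ') 0 then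
      (PySem.List.pySetD st.1 i (some "yellow"),
       st.2.insert (PySem.List.pyGetD gc i ' ') (st.2.getD (PySem.List.pyGetD gc i ' ') 0 - 1))
    else (PySem.List.pySetD st.1 i (some "gray"), st.2)
  else st

def check_guess_statuses_for_word_py_alt (word : String) (guess : String) : List (List (String × String)) :=
  let wc := word.toList
  let gc := guess.toList
  let remaining := (PySem.List.pyRange 0 5 1).foldl (pvBuildStepB wc) PySem.Dict.empty
  let s1 := (PySem.List.pyRange 0 5 1).foldl (pvStepGreenB wc gc) (List.replicate 5 none, remaining)
  let s2 := (PySem.List.pyRange 0 5 1).foldl (pvStepYellowB wc gc) s1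
  (PySem.List.pyRange 0 5 1).map (fun i =>
    [("letter", pvUp (PySem.List.pyGetD gc i ' ')), ("status", (PySem.List.pyGetD s2.1 i none).getD "")])

-- ===== PRECONDITION & SPEC =====
-- Pre_ = exactly the inputs where A returns: both strings at least 5 characters (A raises IndexError otherwise).
def Pre_check_guess_statuses_for_word_py (word : String) (guess : String) : Prop :=
  5 ≤ word.toList.length ∧ 5 ≤ guess.toList.length
instance (word : String) (guess : String) : Decidable (Pre_check_guess_statuses_for_word_py word guess) := by unfold Pre_check_guess_statuses_for_word_py; infer_instance

def pvWitness_check_guess_statuses_for_word_py : String × String := ("apple", "crane")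

def Spec_check_guess_statuses_for_word_py (word : String) (guess : String) (out : List (List (String × String))) : Prop := out = check_guess_statuses_for_word_py_alt word guess
instance (word : String) (guess : String) (out : List (List (String × String))) : Decidable (Spec_check_guess_statuses_for_word_py word guess out) := by unfold Spec_check_guess_statuses_for_word_py; infer_instance

-- ===== CLAIM (what is proved, stated in full; the proofs are below) =====
def Claim_equal_check_guess_statuses_for_word_py : Prop := ∀ (word : String) (guess : String), Dom_check_guess_statuses_for_word_py word guess → Pre_check_guess_statuses_for_word_py word guess → Spec_check_guess_statuses_for_word_py word guess (check_guess_statuses_for_word_py word guess)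

-- ===== LEMMAS AND PROOFS =====

def pvIdx5 : List Int := [0, 1, 2, 3, 4]

theorem pvRange5 : PySem.List.pyRange 0 5 1 = pvIdx5 := by decide

-- contribution of one word position to the pool of unused copies of c
def pvCntb (u : Bool) (w c : Char) : Int := if u = false ∧ w = c then 1 else 0

-- number of word positions j<5 that are not yet used and carry the letter c
def pvCnt (us : List Bool) (wc : List Char) (c : Char) : Int :=
  pvCntb (PySem.List.pyGetD us 0 true) (PySem.List.pyGetD wc 0 ' ') c
  + pvCntb (PySem.List.pyGetD us 1 true) (PySem.List.pyGetD wc 1 ' ') c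
  + pvCntb (PySem.List.pyGetD us 2 true) (PySem.List.pyGetD wc 2 ' ') c
  + pvCntb (PySem.List.pyGetD us 3 true) (PySem.List.pyGetD wc 3 ' ') c
  + pvCntb (PySem.List.pyGetD us 4 true) (PySem.List.pyGetD wc 4 ' ') c

theorem pvCons5 {α : Type} (l : List α) (h : 5 ≤ l.length) :
    ∃ a b c d e t, l = a :: b :: c :: d :: e :: t := by
  rcases l with _ | ⟨a, _ | ⟨b, _ | ⟨c, _ | ⟨d, _ | ⟨e, t⟩⟩⟩⟩⟩ <;> simp at h
  exact ⟨a, b, c, d, e, t, rfl⟩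

theorem pvGetD_build_step (d : PySem.Dict Char Int) (x c : Char) :
    (d.insert x (d.getD x 0 + 1)).getD c 0 = d.getD c 0 + (if x = c then 1 else 0) := by
  rw [PySem.Dict.getD_insert]
  by_cases h : c = x
  · subst h; simp
  · have h' : ¬ x = c := fun hx => h hx.symm
    simp [h, h']

theorem pvGetD_dec_step (d : PySem.Dict Char Int) (x c : Char) :
    (d.insert x (d.getD x 0 - 1)).getD c 0 = d.getD c 0 - (if x = c then 1 else 0) := by
  rw [PySem.Dict.getD_insert]
  by_cases h : c = x
  · subst h; simp
  · have h' : ¬ x = c := fun hx => h hx.symm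
    simp [h, h']

theorem pvBuild_getD (wc : List Char) (c : Char) :
    ((PySem.List.pyRange 0 5 1).foldl (pvBuildStepB wc) PySem.Dict.empty).getD c 0
      = pvCnt (List.replicate 5 false) wc c := by
  rw [pvRange5]
  simp only [pvIdx5, List.foldl_cons, List.foldl_nil, pvBuildStepB]
  rw [pvGetD_build_step, pvGetD_build_step, pvGetD_build_step, pvGetD_build_step, pvGetD_build_step]
  simp [pvCnt, pvCntb, pysem, List.replicate]

set_option maxHeartbeats 2000000 in
theorem pvCnt_set (us : List Bool) (h5 : us.length = 5) (i : Int)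
    (hi : i = 0 ∨ i = 1 ∨ i = 2 ∨ i = 3 ∨ i = 4)
    (hf : PySem.List.pyGetD us i true = false) (wc : List Char) (c : Char) :
    pvCnt (PySem.List.pySetD us i true) wc c
      = pvCnt us wc c - (if PySem.List.pyGetD wc i ' ' = c then 1 else 0) := by
  obtain ⟨a, b, c', d, e, t, rfl⟩ := pvCons5 us (by omega)
  rcases hi with rfl | rfl | rfl | rfl | rfl <;>
    simp [pvCnt, pvCntb, pysem] at hf ⊢ <;> subst hf <;>
    simp only [true_and] <;> split_ifs <;> omega

theorem pvGetD_set_ne (us : List Bool) (h5 : us.length = 5) (i j : Int)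
    (hi : i = 0 ∨ i = 1 ∨ i = 2 ∨ i = 3 ∨ i = 4)
    (hj : j = 0 ∨ j = 1 ∨ j = 2 ∨ j = 3 ∨ j = 4) (hne : j ≠ i) (v : Bool) :
    PySem.List.pyGetD (PySem.List.pySetD us i v) j true = PySem.List.pyGetD us j true := by
  have hnat : ∃ n : Nat, i = (n : Int) ∧ n < us.length := by
    rcases hi with rfl | rfl | rfl | rfl | rfl
    · exact ⟨0, rfl, by omega⟩
    · exact ⟨1, rfl, by omega⟩
    · exact ⟨2, rfl, by omega⟩
    · exact ⟨3, rfl, by omega⟩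
    · exact ⟨4, rfl, by omega⟩
  have hmat : ∃ m : Nat, j = (m : Int) := by
    rcases hj with rfl | rfl | rfl | rfl | rfl
    · exact ⟨0, rfl⟩
    · exact ⟨1, rfl⟩
    · exact ⟨2, rfl⟩
    · exact ⟨3, rfl⟩
    · exact ⟨4, rfl⟩
  obtain ⟨n, rfl, hn⟩ := hnat
  obtain ⟨m, rfl⟩ := hmat
  rw [PySem.List.pyGetD_pySetD_natCast us n m v true hn,
      if_neg (by exact_mod_cast hne)]

theorem pvCntb_nonneg (u : Bool) (w c : Char) : 0 ≤ pvCntb u w c := by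
  unfold pvCntb; split_ifs <;> omega

theorem pvInner_len (wc : List Char) (g : Char) :
    ∀ (js : List Int) (us : List Bool), (pvInnerA wc g js us).2.length = us.length := by
  intro js
  induction js with
  | nil => intro us; simp [pvInnerA]
  | cons j rest ih =>
    intro us
    simp only [pvInnerA]
    split_ifs with h
    · simp [PySem.List.length_pySetD]
    · exact ih us

theorem pvInner_notfound (wc : List Char) (g : Char) :
    ∀ (js : List Int) (us : List Bool),
      (pvInnerA wc g js us).1 = false → (pvInnerA wc g js us).2 = us := by
  intro js
  induction js with
  | nil => intro us _; rfl
  | cons j rest ih =>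
    intro us h
    simp only [pvInnerA] at h ⊢
    by_cases hc : PySem.List.pyGetD us j true = false ∧ PySem.List.pyGetD wc j ' ' = g
    · rw [if_pos hc] at h
      simp at h
    · rw [if_neg hc] at h ⊢
      exact ih us h

theorem pvInner_found (wc : List Char) (g : Char) (us : List Bool) :
    (pvInnerA wc g pvIdx5 us).1 = true ↔ 0 < pvCnt us wc g := by
  have n0 := pvCntb_nonneg (PySem.List.pyGetD us 0 true) (PySem.List.pyGetD wc 0 ' ') g
  have n1 := pvCntb_nonneg (PySem.List.pyGetD us 1 true) (PySem.List.pyGetD wc 1 ' ') g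
  have n2 := pvCntb_nonneg (PySem.List.pyGetD us 2 true) (PySem.List.pyGetD wc 2 ' ') g
  have n3 := pvCntb_nonneg (PySem.List.pyGetD us 3 true) (PySem.List.pyGetD wc 3 ' ') g
  have n4 := pvCntb_nonneg (PySem.List.pyGetD us 4 true) (PySem.List.pyGetD wc 4 ' ') g
  simp only [pvIdx5, pvInnerA]
  split_ifs with h0 h1 h2 h3 h4
  · refine iff_of_true rfl ?_
    have e : pvCntb (PySem.List.pyGetD us 0 true) (PySem.List.pyGetD wc 0 ' ') g = 1 := by
      simp [pvCntb, h0.1, h0.2]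
    simp only [pvCnt]; omega
  · refine iff_of_true rfl ?_
    have e : pvCntb (PySem.List.pyGetD us 1 true) (PySem.List.pyGetD wc 1 ' ') g = 1 := by
      simp [pvCntb, h1.1, h1.2]
    simp only [pvCnt]; omega
  · refine iff_of_true rfl ?_
    have e : pvCntb (PySem.List.pyGetD us 2 true) (PySem.List.pyGetD wc 2 ' ') g = 1 := by
      simp [pvCntb, h2.1, h2.2]
    simp only [pvCnt]; omega
  · refine iff_of_true rfl ?_
    have e : pvCntb (PySem.List.pyGetD us 3 true) (PySem.List.pyGetD wc 3 ' ') g = 1 := by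
      simp [pvCntb, h3.1, h3.2]
    simp only [pvCnt]; omega
  · refine iff_of_true rfl ?_
    have e : pvCntb (PySem.List.pyGetD us 4 true) (PySem.List.pyGetD wc 4 ' ') g = 1 := by
      simp [pvCntb, h4.1, h4.2]
    simp only [pvCnt]; omega
  · refine iff_of_false (by simp) ?_
    have e0 : pvCntb (PySem.List.pyGetD us 0 true) (PySem.List.pyGetD wc 0 ' ') g = 0 := by
      simp only [pvCntb, if_neg h0]
    have e1 : pvCntb (PySem.List.pyGetD us 1 true) (PySem.List.pyGetD wc 1 ' ') g = 0 := by
      simp only [pvCntb, if_neg h1]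
    have e2 : pvCntb (PySem.List.pyGetD us 2 true) (PySem.List.pyGetD wc 2 ' ') g = 0 := by
      simp only [pvCntb, if_neg h2]
    have e3 : pvCntb (PySem.List.pyGetD us 3 true) (PySem.List.pyGetD wc 3 ' ') g = 0 := by
      simp only [pvCntb, if_neg h3]
    have e4 : pvCntb (PySem.List.pyGetD us 4 true) (PySem.List.pyGetD wc 4 ' ') g = 0 := by
      simp only [pvCntb, if_neg h4]
    simp only [pvCnt]; omega

theorem pvInner_cnt (wc : List Char) (g : Char) (us : List Bool) (h5 : us.length = 5) (c : Char)
    (hfound : (pvInnerA wc g pvIdx5 us).1 = true) :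
    pvCnt (pvInnerA wc g pvIdx5 us).2 wc c = pvCnt us wc c - (if g = c then 1 else 0) := by
  simp only [pvIdx5, pvInnerA] at hfound ⊢
  split_ifs at hfound with h0 h1 h2 h3 h4
  · simp only [if_pos h0]
    rw [pvCnt_set us h5 0 (by tauto) h0.1 wc c, h0.2]
  · simp only [if_neg h0, if_pos h1]
    rw [pvCnt_set us h5 1 (by tauto) h1.1 wc c, h1.2]
  · simp only [if_neg h0, if_neg h1, if_pos h2]
    rw [pvCnt_set us h5 2 (by tauto) h2.1 wc c, h2.2]
  · simp only [if_neg h0, if_neg h1, if_neg h2, if_pos h3]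
    rw [pvCnt_set us h5 3 (by tauto) h3.1 wc c, h3.2]
  · simp only [if_neg h0, if_neg h1, if_neg h2, if_neg h3, if_pos h4]
    rw [pvCnt_set us h5 4 (by tauto) h4.1 wc c, h4.2]

theorem pvGreen_step (wc gc : List Char) (i : Int)
    (hi : i = 0 ∨ i = 1 ∨ i = 2 ∨ i = 3 ∨ i = 4)
    (sA : List (Option String) × List Bool) (sB : List (Option String) × PySem.Dict Char Int)
    (h1 : sA.1 = sB.1) (h2 : ∀ c, sB.2.getD c 0 = pvCnt sA.2 wc c) (h5 : sA.2.length = 5)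
    (hf : PySem.List.pyGetD sA.2 i true = false) :
    (pvStepGreenA wc gc sA i).1 = (pvStepGreenB wc gc sB i).1
    ∧ (∀ c, (pvStepGreenB wc gc sB i).2.getD c 0 = pvCnt (pvStepGreenA wc gc sA i).2 wc c)
    ∧ (pvStepGreenA wc gc sA i).2.length = 5
    ∧ (∀ j : Int, j = 0 ∨ j = 1 ∨ j = 2 ∨ j = 3 ∨ j = 4 → j ≠ i →
        PySem.List.pyGetD (pvStepGreenA wc gc sA i).2 j true = PySem.List.pyGetD sA.2 j true) := by
  obtain ⟨stA, usA⟩ := sA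
  obtain ⟨stB, rem⟩ := sB
  dsimp only at h1 h2 h5 hf ⊢
  subst h1
  unfold pvStepGreenA pvStepGreenB
  dsimp only
  split_ifs with hc
  · refine ⟨rfl, ?_, ?_, ?_⟩
    · intro c
      rw [pvGetD_dec_step, pvCnt_set usA h5 i hi hf wc c, h2]
    · simp [PySem.List.length_pySetD, h5]
    · intro j hj hne
      exact pvGetD_set_ne usA h5 i j hi hj hne true
  · exact ⟨rfl, h2, h5, fun _ _ _ => rfl⟩

theorem pvYellow_step (wc gc : List Char) (i : Int)
    (sA : List (Option String) × List Bool) (sB : List (Option String) × PySem.Dict Char Int)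
    (h1 : sA.1 = sB.1) (h2 : ∀ c, sB.2.getD c 0 = pvCnt sA.2 wc c) (h5 : sA.2.length = 5) :
    (pvStepYellowA wc gc sA i).1 = (pvStepYellowB wc gc sB i).1
    ∧ (∀ c, (pvStepYellowB wc gc sB i).2.getD c 0 = pvCnt (pvStepYellowA wc gc sA i).2 wc c)
    ∧ (pvStepYellowA wc gc sA i).2.length = 5 := by
  obtain ⟨stA, usA⟩ := sA
  obtain ⟨stB, rem⟩ := sB
  dsimp only at h1 h2 h5 ⊢
  subst h1
  unfold pvStepYellowA pvStepYellowB
  dsimp only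
  rw [pvRange5]
  by_cases t : PySem.List.pyGetD stA i none = none
  · rw [if_pos t, if_pos t]
    by_cases f : (pvInnerA wc (PySem.List.pyGetD gc i ' ') pvIdx5 usA).1 = true
    · have hb : 0 < rem.getD (PySem.List.pyGetD gc i ' ') 0 := by
        rw [h2]; exact (pvInner_found wc _ usA).mp f
      rw [if_pos hb, if_pos f]
      refine ⟨rfl, ?_, ?_⟩
      · intro c
        dsimp only
        rw [pvGetD_dec_step, pvInner_cnt wc _ usA h5 c f, h2]
      · dsimp only
        rw [pvInner_len]; exact h5
    · have f' : (pvInnerA wc (PySem.List.pyGetD gc i ' ') pvIdx5 usA).1 = false := by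
        simpa using f
      have hb : ¬ 0 < rem.getD (PySem.List.pyGetD gc i ' ') 0 := by
        rw [h2]
        intro hpos
        exact f ((pvInner_found wc _ usA).mpr hpos)
      have hu := pvInner_notfound wc (PySem.List.pyGetD gc i ' ') pvIdx5 usA f'
      rw [if_neg hb, if_neg f]
      refine ⟨rfl, ?_, ?_⟩
      · intro c
        dsimp only
        rw [hu, h2]
      · dsimp only
        rw [hu]; exact h5
  · rw [if_neg t, if_neg t]
    exact ⟨rfl, h2, h5⟩

set_option maxHeartbeats 2000000 in
theorem pvPass1 (wc gc : List Char) :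
    (pvIdx5.foldl (pvStepGreenA wc gc) (List.replicate 5 none, List.replicate 5 false)).1
      = (pvIdx5.foldl (pvStepGreenB wc gc)
          (List.replicate 5 none, pvIdx5.foldl (pvBuildStepB wc) PySem.Dict.empty)).1
    ∧ (∀ c, (pvIdx5.foldl (pvStepGreenB wc gc)
          (List.replicate 5 none, pvIdx5.foldl (pvBuildStepB wc) PySem.Dict.empty)).2.getD c 0
        = pvCnt (pvIdx5.foldl (pvStepGreenA wc gc)
            (List.replicate 5 none, List.replicate 5 false)).2 wc c)
    ∧ (pvIdx5.foldl (pvStepGreenA wc gc) (List.replicate 5 none, List.replicate 5 false)).2.length = 5 := by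
  have basef : ∀ j : Int, j = 0 ∨ j = 1 ∨ j = 2 ∨ j = 3 ∨ j = 4 →
      PySem.List.pyGetD (List.replicate 5 false) j true = false := by
    intro j hj; rcases hj with rfl | rfl | rfl | rfl | rfl <;> decide
  have base2 : ∀ c, (pvIdx5.foldl (pvBuildStepB wc) PySem.Dict.empty).getD c 0
      = pvCnt (List.replicate 5 false) wc c := by
    intro c; rw [← pvRange5]; exact pvBuild_getD wc c
  simp only [pvIdx5, List.foldl_cons, List.foldl_nil] at base2 ⊢
  obtain ⟨a1, a2, a5, af⟩ :=
    pvGreen_step wc gc 0 (by tauto)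
      (List.replicate 5 none, List.replicate 5 false)
      (List.replicate 5 none,
        pvBuildStepB wc (pvBuildStepB wc (pvBuildStepB wc (pvBuildStepB wc
          (pvBuildStepB wc PySem.Dict.empty 0) 1) 2) 3) 4)
      rfl base2 (by simp) (basef 0 (by tauto))
  obtain ⟨b1, b2, b5, bf⟩ :=
    pvGreen_step wc gc 1 (by tauto) _ _ a1 a2 a5
      (by rw [af 1 (by tauto) (by decide)]; exact basef 1 (by tauto))
  obtain ⟨c1, c2, c5, cf⟩ :=
    pvGreen_step wc gc 2 (by tauto) _ _ b1 b2 b5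
      (by rw [bf 2 (by tauto) (by decide), af 2 (by tauto) (by decide)]; exact basef 2 (by tauto))
  obtain ⟨d1, d2, d5, df⟩ :=
    pvGreen_step wc gc 3 (by tauto) _ _ c1 c2 c5
      (by rw [cf 3 (by tauto) (by decide), bf 3 (by tauto) (by decide),
              af 3 (by tauto) (by decide)]; exact basef 3 (by tauto))
  obtain ⟨e1, e2, e5, _⟩ :=
    pvGreen_step wc gc 4 (by tauto) _ _ d1 d2 d5
      (by rw [df 4 (by tauto) (by decide), cf 4 (by tauto) (by decide),
              bf 4 (by tauto) (by decide), af 4 (by tauto) (by decide)]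
          exact basef 4 (by tauto))
  exact ⟨e1, e2, e5⟩

set_option maxHeartbeats 2000000 in
theorem pvPass2 (wc gc : List Char) (sA : List (Option String) × List Bool)
    (sB : List (Option String) × PySem.Dict Char Int)
    (h1 : sA.1 = sB.1) (h2 : ∀ c, sB.2.getD c 0 = pvCnt sA.2 wc c) (h5 : sA.2.length = 5) :
    (pvIdx5.foldl (pvStepYellowA wc gc) sA).1 = (pvIdx5.foldl (pvStepYellowB wc gc) sB).1 := by
  simp only [pvIdx5, List.foldl_cons, List.foldl_nil]
  obtain ⟨a1, a2, a5⟩ := pvYellow_step wc gc 0 _ _ h1 h2 h5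
  obtain ⟨b1, b2, b5⟩ := pvYellow_step wc gc 1 _ _ a1 a2 a5
  obtain ⟨c1, c2, c5⟩ := pvYellow_step wc gc 2 _ _ b1 b2 b5
  obtain ⟨d1, d2, d5⟩ := pvYellow_step wc gc 3 _ _ c1 c2 c5
  obtain ⟨e1, _, _⟩ := pvYellow_step wc gc 4 _ _ d1 d2 d5
  exact e1

theorem pvLetter (a b c d e : Char) (t : List Char) (i : Int)
    (hi : i = 0 ∨ i = 1 ∨ i = 2 ∨ i = 3 ∨ i = 4) :
    PySem.List.pyGetD ((a :: b :: c :: d :: e :: t).map pvUp) i ""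
      = pvUp (PySem.List.pyGetD (a :: b :: c :: d :: e :: t) i ' ') := by
  rcases hi with rfl | rfl | rfl | rfl | rfl <;> simp [pysem]

-- ===== VERDICT (by name: the statement is the Claim_ definition above) =====
set_option maxHeartbeats 2000000 in
theorem check_guess_statuses_for_word_py_spec : Claim_equal_check_guess_statuses_for_word_py := by
  intro word guess _ hpre
  obtain ⟨hw, hg⟩ := hpre
  unfold Spec_check_guess_statuses_for_word_py
  unfold check_guess_statuses_for_word_py check_guess_statuses_for_word_py_alt
  simp only [pvRange5]
  obtain ⟨p1, p2, p5⟩ := pvPass1 word.toList guess.toList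
  have hst := pvPass2 word.toList guess.toList _ _ p1 p2 p5
  rw [hst]
  refine List.map_congr_left ?_
  intro i hi
  obtain ⟨a, b, c, d, e, t, hgc⟩ := pvCons5 guess.toList hg
  rw [hgc]
  simp only [pvIdx5] at hi
  simp only [List.mem_cons] at hi
  rcases hi with rfl | rfl | rfl | rfl | rfl | h
  · rw [pvLetter a b c d e t 0 (Or.inl rfl)]
  · rw [pvLetter a b c d e t 1 (Or.inr (Or.inl rfl))]
  · rw [pvLetter a b c d e t 2 (Or.inr (Or.inr (Or.inl rfl)))]
  · rw [pvLetter a b c d e t 3 (Or.inr (Or.inr (Or.inr (Or.inl rfl))))]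
  · rw [pvLetter a b c d e t 4 (Or.inr (Or.inr (Or.inr (Or.inr rfl))))]
  · simp at h
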